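-- pv_equiv track=rewrite | github.com/MIVAA-ai/mivaa-graphrag-assistant-v3 | text2cypher/neo4j_fewshot_manager.py | _parse_generated_examples
-- ===== SOURCE A (Python) =====
-- from typing import Any, Dict, List, Optional
--
-- def _parse_generated_examples(response: str) -> List[Dict[str, str]]:
--     """OPTIMIZED: Faster parsing of generated examples."""
--     examples = []
--     lines = response.split('\n')
--     current_example = {}
--
--     for line in lines:
--         line = line.strip()
--         if line.startswith('Question:'):
--             if current_example and 'question' in current_example and 'cypher' in current_example:
--                 examples.append(current_example)
--             current_example = {'question': line[9:].strip()}
--         elif line.startswith('Cypher:'):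
--             if 'question' in current_example:
--                 current_example['cypher'] = line[7:].strip()
--
--     # Add the last example
--     if current_example and 'question' in current_example and 'cypher' in current_example:
--         examples.append(current_example)
--
--     return examples
-- ===== SOURCE B (Python) =====
-- from typing import Dict, List
--
-- def _parse_generated_examples(response: str) -> List[Dict[str, str]]:
--     lines = [raw.strip() for raw in response.split('\n')]
--     n = len(lines)
--     out = []
--     i = 0
--     while i < n:
--         if not lines[i].startswith('Question:'):
--             i += 1
--             continue
--         question = lines[i][9:].strip()
--         cypher = None
--         j = i + 1
--         while j < n and not lines[j].startswith('Question:'):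
--             if lines[j].startswith('Cypher:'):
--                 cypher = lines[j][7:].strip()
--             j += 1
--         if cypher is not None:
--             out.append({'question': question, 'cypher': cypher})
--         i = j
--     return out
-- ===== Notes on version B (the rewrite author's own statement) =====
-- stated objective: alternative
-- what changed: Replaced A's single fold with a running current_example dict by an index-based two-level scan: an outer loop that jumps from one 'Question:' line to the next and an inner loop that scans the segment keeping the last 'Cypher:' payload, emitting a completed example per segment.
import Mathlib
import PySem

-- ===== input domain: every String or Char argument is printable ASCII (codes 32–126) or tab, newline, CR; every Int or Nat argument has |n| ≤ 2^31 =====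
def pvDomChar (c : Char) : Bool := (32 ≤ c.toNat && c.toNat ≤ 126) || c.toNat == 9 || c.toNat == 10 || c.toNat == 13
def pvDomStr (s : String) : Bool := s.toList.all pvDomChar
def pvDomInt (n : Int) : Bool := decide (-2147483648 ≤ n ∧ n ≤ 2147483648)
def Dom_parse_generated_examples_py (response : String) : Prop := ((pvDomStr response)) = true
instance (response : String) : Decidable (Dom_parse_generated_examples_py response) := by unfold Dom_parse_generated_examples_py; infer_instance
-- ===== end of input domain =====

-- B replaces A's running-dict state machine by a segment-by-segment two-level scan (objective: alternative decomposition, same cost).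

-- ===== PORT A =====
-- the loop body after `line = line.strip()` (Python rebinds `line`; pyA_step strips first, then runs this)
def pyA_stepS (st : List (List (String × String)) × PySem.Dict String String) (line : String) :
    List (List (String × String)) × PySem.Dict String String :=
  if PySem.Str.startswith line "Question:" then
    let examples :=
      if st.2.size ≠ 0 ∧ st.2.contains "question" ∧ st.2.contains "cypher"
      then st.1 ++ [st.2.items] else st.1
    (examples, PySem.Dict.empty.insert "question" (PySem.Str.strip (PySem.Str.slice line (some 9) none)))
  else if PySem.Str.startswith line "Cypher:" then
    if st.2.contains "question"
    then (st.1, st.2.insert "cypher" (PySem.Str.strip (PySem.Str.slice line (some 7) none)))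
    else st
  else st

def pyA_step (st : List (List (String × String)) × PySem.Dict String String) (line0 : String) :
    List (List (String × String)) × PySem.Dict String String :=
  pyA_stepS st (PySem.Str.strip line0)

def parse_generated_examples_py (response : String) : List (List (String × String)) :=
  let lines := (PySem.Chars.splitOn response.toList ['\n']).map String.ofList
  let st := lines.foldl pyA_step ([], PySem.Dict.empty)
  if st.2.size ≠ 0 ∧ st.2.contains "question" ∧ st.2.contains "cypher"
  then st.1 ++ [st.2.items] else st.1

-- ===== PORT B =====
def pyB_isQ (l : String) : Bool := PySem.Str.startswith l "Question:"
def pyB_isC (l : String) : Bool := PySem.Str.startswith l "Cypher:"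

-- inner while-loop: scan to the next 'Question:' line, keeping the last 'Cypher:' payload
def pyB_scanSeg : Option String → List String → Option String × List String
  | c?, [] => (c?, [])
  | c?, l :: ls =>
    if pyB_isQ l then (c?, l :: ls)
    else pyB_scanSeg (if pyB_isC l then some (PySem.Str.strip (PySem.Str.slice l (some 7) none)) else c?) ls

theorem pyB_scanSeg_len (c? : Option String) (ls : List String) :
    (pyB_scanSeg c? ls).2.length ≤ ls.length := by
  induction ls generalizing c? with
  | nil => simp [pyB_scanSeg]
  | cons l ls ih =>
    simp only [pyB_scanSeg]
    split
    · simp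
    · exact le_trans (ih _) (by simp)

-- outer while-loop over segments
def pyB_parseSegs : List String → List (List (String × String))
  | [] => []
  | l :: ls =>
    if pyB_isQ l then
      let q := PySem.Str.strip (PySem.Str.slice l (some 9) none)
      let r := pyB_scanSeg none ls
      (match r.1 with
       | some c => [[("question", q), ("cypher", c)]]
       | none => []) ++ pyB_parseSegs r.2
    else pyB_parseSegs ls
termination_by ls => ls.length
decreasing_by
  · exact Nat.lt_succ_of_le (pyB_scanSeg_len none ls)
  · simp

def parse_generated_examples_py_alt (response : String) : List (List (String × String)) :=
  let lines := ((PySem.Chars.splitOn response.toList ['\n']).map String.ofList).map PySem.Str.strip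
  pyB_parseSegs lines

-- ===== PRECONDITION & SPEC =====
def Spec_parse_generated_examples_py (response : String) (out : List (List (String × String))) : Prop := out = parse_generated_examples_py_alt response
instance (response : String) (out : List (List (String × String))) : Decidable (Spec_parse_generated_examples_py response out) := by unfold Spec_parse_generated_examples_py; infer_instance

-- ===== CLAIM (what is proved, stated in full; the proofs are below) =====
def Claim_equal_parse_generated_examples_py : Prop := ∀ (response : String), Dom_parse_generated_examples_py response → Spec_parse_generated_examples_py response (parse_generated_examples_py response)

-- ===== LEMMAS AND PROOFS =====

-- A's current_example dict when it holds a question q and optionally a cypher c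
def pvDcur (q : String) : Option String → PySem.Dict String String
  | none => PySem.Dict.empty.insert "question" q
  | some c => (PySem.Dict.empty.insert "question" q).insert "cypher" c

-- A's trailing "add the last example" step
def pvFinalA (st : List (List (String × String)) × PySem.Dict String String) : List (List (String × String)) :=
  if st.2.size ≠ 0 ∧ st.2.contains "question" ∧ st.2.contains "cypher"
  then st.1 ++ [st.2.items] else st.1

-- B's result for the remainder of one open segment with question q and pending cypher c?
def pvSegRes (q : String) (c? : Option String) (ls : List String) : List (List (String × String)) :=
  (match (pyB_scanSeg c? ls).1 with
   | some c => [[("question", q), ("cypher", c)]]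
   | none => []) ++ pyB_parseSegs (pyB_scanSeg c? ls).2

theorem pvFinalA_dcur (ex : List (List (String × String))) (q : String) (c? : Option String) :
    pvFinalA (ex, pvDcur q c?) =
      ex ++ (match c? with
             | some c => [[("question", q), ("cypher", c)]]
             | none => []) := by
  cases c? <;>
    simp [pvFinalA, pvDcur, PySem.Dict.insert, PySem.Dict.contains, PySem.Dict.empty,
      PySem.Dict.size]

theorem pvSeg (ls : List String) :
    ∀ (ex : List (List (String × String))) (q : String) (c? : Option String),
      pvFinalA (List.foldl pyA_stepS (ex, pvDcur q c?) ls) = ex ++ pvSegRes q c? ls := by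
  induction ls with
  | nil =>
    intro ex q c?
    simp only [List.foldl_nil, pvSegRes, pyB_scanSeg, pyB_parseSegs, List.append_nil]
    exact pvFinalA_dcur ex q c?
  | cons l ls ih =>
    intro ex q c?
    by_cases hQ : pyB_isQ l = true
    · -- a new Question: emit the pending example (if complete), restart the dict
      have hstep : pyA_stepS (ex, pvDcur q c?) l =
          (ex ++ (match c? with
                  | some c => [[("question", q), ("cypher", c)]]
                  | none => []),
           pvDcur (PySem.Str.strip (PySem.Str.slice l (some 9) none)) none) := by
        have h9 := pyB_isQ l
        cases c? <;>
          simp_all [pyA_stepS, pyB_isQ, pvDcur, PySem.Dict.insert,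
            PySem.Dict.contains, PySem.Dict.empty, PySem.Dict.size]
      rw [List.foldl_cons, hstep, ih]
      simp only [pvSegRes, pyB_scanSeg, hQ, if_pos, pyB_parseSegs, List.append_assoc]
    · by_cases hC : pyB_isC l = true
      · -- a Cypher line: overwrite the pending cypher
        have hstep : pyA_stepS (ex, pvDcur q c?) l =
            (ex, pvDcur q (some (PySem.Str.strip (PySem.Str.slice l (some 7) none)))) := by
          cases c? <;>
            simp_all [pyA_stepS, pyB_isQ, pyB_isC, pvDcur, PySem.Dict.insert,
              PySem.Dict.contains, PySem.Dict.empty]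
        rw [List.foldl_cons, hstep, ih]
        simp [pvSegRes, pyB_scanSeg, hQ, hC]
      · -- anything else: no change
        have hstep : pyA_stepS (ex, pvDcur q c?) l = (ex, pvDcur q c?) := by
          simp_all [pyA_stepS, pyB_isQ, pyB_isC]
        rw [List.foldl_cons, hstep, ih]
        simp [pvSegRes, pyB_scanSeg, hQ, hC]

theorem pvSkip (ls : List String) :
    ∀ (ex : List (List (String × String))),
      pvFinalA (List.foldl pyA_stepS (ex, PySem.Dict.empty) ls) = ex ++ pyB_parseSegs ls := by
  induction ls with
  | nil =>
    intro ex
    simp [pvFinalA, pyB_parseSegs, PySem.Dict.empty, PySem.Dict.size]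
  | cons l ls ih =>
    intro ex
    by_cases hQ : pyB_isQ l = true
    · have hstep : pyA_stepS (ex, PySem.Dict.empty) l =
          (ex, pvDcur (PySem.Str.strip (PySem.Str.slice l (some 9) none)) none) := by
        simp_all [pyA_stepS, pyB_isQ, pvDcur, PySem.Dict.empty, PySem.Dict.size]
      rw [List.foldl_cons, hstep, pvSeg]
      simp only [pyB_parseSegs, hQ, if_pos, pvSegRes]
    · have hstep : pyA_stepS (ex, PySem.Dict.empty) l = (ex, PySem.Dict.empty) := by
        by_cases hC : pyB_isC l = true <;>
          simp_all [pyA_stepS, pyB_isQ, pyB_isC, PySem.Dict.contains, PySem.Dict.empty]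
      rw [List.foldl_cons, hstep, ih]
      simp [pyB_parseSegs, hQ]

-- ===== VERDICT (by name: the statement is the Claim_ definition above) =====
theorem parse_generated_examples_py_spec : Claim_equal_parse_generated_examples_py := by
  intro response _
  unfold Spec_parse_generated_examples_py parse_generated_examples_py parse_generated_examples_py_alt
  have h : List.foldl pyA_step (([], PySem.Dict.empty) :
        List (List (String × String)) × PySem.Dict String String)
        ((PySem.Chars.splitOn response.toList ['\n']).map String.ofList) =
      List.foldl pyA_stepS ([], PySem.Dict.empty)
        (((PySem.Chars.splitOn response.toList ['\n']).map String.ofList).map PySem.Str.strip) := by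
    simp [List.foldl_map, pyA_step]
  show pvFinalA _ = _
  rw [h, pvSkip]
  simp
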